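-- pv_equiv track=rewrite | github.com/tomislavrupic/HAOS-IIP | numerics/simulations/stage_c0_5_emergent_compression_preorder.py | pairwise_partition_mismatch
-- ===== SOURCE A (Python) =====
-- def pairwise_partition_mismatch(
--     support: list[int],
--     adjacency_map: dict[int, tuple[int, ...]],
--     shell_map: dict[int, tuple[int, ...]],
-- ) -> tuple[int, dict[int, int]]:
--     nodes = [int(node) for node in support]
--     contributions = {int(node): 0 for node in nodes}
--     mismatch = 0
--     for idx, u in enumerate(nodes[:-1]):
--         for v in nodes[idx + 1 :]:
--             same_adj = adjacency_map.get(u) == adjacency_map.get(v)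
--             same_shell = shell_map.get(u) == shell_map.get(v)
--             if same_adj != same_shell:
--                 mismatch += 1
--                 contributions[u] += 1
--                 contributions[v] += 1
--     return mismatch, contributions
-- ===== SOURCE B (Python) =====
-- def pairwise_partition_mismatch(
--     support,
--     adjacency_map,
--     shell_map,
-- ):
--     nodes = [int(node) for node in support]
--     keys = [(adjacency_map.get(u), shell_map.get(u)) for u in nodes]
--     cnt_adj = {}
--     cnt_shell = {}
--     cnt_both = {}
--     for a, s in keys:
--         cnt_adj[a] = cnt_adj.get(a, 0) + 1
--         cnt_shell[s] = cnt_shell.get(s, 0) + 1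
--         cnt_both[(a, s)] = cnt_both.get((a, s), 0) + 1
--     contributions = {u: 0 for u in nodes}
--     total = 0
--     for u, (a, s) in zip(nodes, keys):
--         c = cnt_adj[a] + cnt_shell[s] - 2 * cnt_both[(a, s)]
--         contributions[u] += c
--         total += c
--     return total // 2, contributions
-- ===== Notes on version B (the rewrite author's own statement) =====
-- stated objective: faster
-- what changed: Replaces A's O(n^2) double loop over node pairs by one O(n) pass that groups nodes with dict counters keyed by adjacency key, shell key and the combined pair, then computes each node's contribution by inclusion-exclusion (cnt_adj + cnt_shell - 2*cnt_both) and the total as half the contribution sum.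
import Mathlib
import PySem

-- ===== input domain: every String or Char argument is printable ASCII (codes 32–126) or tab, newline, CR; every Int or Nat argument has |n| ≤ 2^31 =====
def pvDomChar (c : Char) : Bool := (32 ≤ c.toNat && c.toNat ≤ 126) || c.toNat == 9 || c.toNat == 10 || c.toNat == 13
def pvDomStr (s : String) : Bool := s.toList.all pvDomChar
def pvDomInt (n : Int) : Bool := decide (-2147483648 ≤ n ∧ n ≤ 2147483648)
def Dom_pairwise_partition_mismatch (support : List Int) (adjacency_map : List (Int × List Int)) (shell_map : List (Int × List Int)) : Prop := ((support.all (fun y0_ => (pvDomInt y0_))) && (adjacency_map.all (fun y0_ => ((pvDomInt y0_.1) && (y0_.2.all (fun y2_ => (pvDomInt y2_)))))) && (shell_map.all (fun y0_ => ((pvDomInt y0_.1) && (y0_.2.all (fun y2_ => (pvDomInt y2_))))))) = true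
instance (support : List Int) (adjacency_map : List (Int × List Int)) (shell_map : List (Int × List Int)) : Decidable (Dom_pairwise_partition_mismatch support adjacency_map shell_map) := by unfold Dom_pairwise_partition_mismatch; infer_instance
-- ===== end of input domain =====

-- B replaces A's O(n^2) double loop over node pairs by O(n) grouping counters over
-- (adjacency-key, shell-key) with an inclusion–exclusion formula; return value proved equal.

-- shared helper: `m.get(u)` for the dict passed in as an association list
def pvGet (m : List (Int × List Int)) (u : Int) : Option (List Int) :=
  (PySem.Dict.mk m).get? u

-- `same_adj != same_shell` for the pair (u, v)
def pvDiffer (am sm : List (Int × List Int)) (u v : Int) : Bool :=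
  !((pvGet am u == pvGet am v) == (pvGet sm u == pvGet sm v))

-- ===== PORT A =====
-- inner loop: `for v in nodes[idx+1:]: …`.  `contributions[u] += 1` is ported as
-- `modify u 0 (·+1)`: u and v are members of nodes, hence keys of the dict, so the
-- default 0 is never used (Python's KeyError cannot occur).
def pvInnerA (am sm : List (Int × List Int)) (u : Int) (vs : List Int)
    (acc : Int × PySem.Dict Int Int) : Int × PySem.Dict Int Int :=
  vs.foldl (fun acc v =>
    if pvDiffer am sm u v then
      (acc.1 + 1, ((acc.2.modify u 0 (· + 1)).modify v 0 (· + 1)))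
    else acc) acc

-- outer loop: `for idx, u in enumerate(nodes[:-1]): for v in nodes[idx+1:]`;
-- each u is paired with the tail after it, which is exactly structural recursion on
-- the list (the last element, dropped by `[:-1]`, gets an empty inner loop).
def pvOuterA (am sm : List (Int × List Int)) :
    List Int → Int × PySem.Dict Int Int → Int × PySem.Dict Int Int
  | [], acc => acc
  | u :: rest, acc => pvOuterA am sm rest (pvInnerA am sm u rest acc)

def pairwise_partition_mismatch (support : List Int) (adjacency_map : List (Int × List Int)) (shell_map : List (Int × List Int)) : Int × (List (Int × Int)) :=
  let nodes := support                              -- int(node) is the identity on Int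
  let contributions : PySem.Dict Int Int :=
    nodes.foldl (fun d x => d.insert x 0) PySem.Dict.empty
  let r := pvOuterA adjacency_map shell_map nodes (0, contributions)
  (r.1, r.2.items)

-- ===== PORT B =====
def pairwise_partition_mismatch_alt (support : List Int) (adjacency_map : List (Int × List Int)) (shell_map : List (Int × List Int)) : Int × (List (Int × Int)) :=
  let nodes := support
  let keys := nodes.map (fun u => (pvGet adjacency_map u, pvGet shell_map u))
  -- one loop filling the three counters (cnt_adj, cnt_shell, cnt_both)
  let cnts := keys.foldl
    (fun t k =>
      (t.1.insert k.1 (t.1.getD k.1 0 + 1),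
       (t.2.1.insert k.2 (t.2.1.getD k.2 0 + 1),
        t.2.2.insert k (t.2.2.getD k 0 + 1))))
    ((PySem.Dict.empty : PySem.Dict (Option (List Int)) Int),
     ((PySem.Dict.empty : PySem.Dict (Option (List Int)) Int),
      (PySem.Dict.empty : PySem.Dict ((Option (List Int)) × Option (List Int)) Int)))
  let contributions : PySem.Dict Int Int :=
    nodes.foldl (fun d x => d.insert x 0) PySem.Dict.empty
  -- `for u, (a, s) in zip(nodes, keys): …`; `contributions[u] += c` as modify (u is a key)
  let r := (nodes.zip keys).foldl
    (fun acc p =>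
      let c := cnts.1.getD p.2.1 0 + cnts.2.1.getD p.2.2 0 - 2 * cnts.2.2.getD p.2 0
      (acc.1.modify p.1 0 (· + c), acc.2 + c))
    (contributions, (0 : Int))
  (PySem.Int.floordiv r.2 2, r.1.items)

-- ===== PRECONDITION & SPEC =====
def Spec_pairwise_partition_mismatch (support : List Int) (adjacency_map : List (Int × List Int)) (shell_map : List (Int × List Int)) (out : Int × (List (Int × Int))) : Prop := out = pairwise_partition_mismatch_alt support adjacency_map shell_map
instance (support : List Int) (adjacency_map : List (Int × List Int)) (shell_map : List (Int × List Int)) (out : Int × (List (Int × Int))) : Decidable (Spec_pairwise_partition_mismatch support adjacency_map shell_map out) := by unfold Spec_pairwise_partition_mismatch; infer_instance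

-- ===== CLAIM (what is proved, stated in full; the proofs are below) =====
def Claim_equal_pairwise_partition_mismatch : Prop := ∀ (support : List Int) (adjacency_map : List (Int × List Int)) (shell_map : List (Int × List Int)), Dom_pairwise_partition_mismatch support adjacency_map shell_map → Spec_pairwise_partition_mismatch support adjacency_map shell_map (pairwise_partition_mismatch support adjacency_map shell_map)

-- ===== LEMMAS AND PROOFS =====

-- number of mismatch partners of u in l
def pvG (am sm : List (Int × List Int)) (u : Int) (l : List Int) : Int :=
  (l.countP (pvDiffer am sm u) : Int)

-- number of mismatching unordered pairs, in A's traversal order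
def pvPair (am sm : List (Int × List Int)) : List Int → Int
  | [] => 0
  | u :: r => pvG am sm u r + pvPair am sm r

theorem pvDiffer_self (am sm : List (Int × List Int)) (u : Int) :
    pvDiffer am sm u u = false := by simp [pvDiffer]

theorem pvDiffer_comm (am sm : List (Int × List Int)) (u v : Int) :
    pvDiffer am sm u v = pvDiffer am sm v u := by
  simp [pvDiffer, eq_comm]

-- ---- A's inner loop ----
theorem pvInnerA_fst (am sm : List (Int × List Int)) (u : Int) (vs : List Int)
    (m : Int) (d : PySem.Dict Int Int) :
    (pvInnerA am sm u vs (m, d)).1 = m + pvG am sm u vs := by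
  induction vs generalizing m d with
  | nil => simp [pvInnerA, pvG]
  | cons v vs ih =>
    simp only [pvInnerA] at ih ⊢
    rw [List.foldl_cons]
    by_cases h : pvDiffer am sm u v
    · rw [if_pos h, ih]; simp [pvG, h]; ring
    · rw [if_neg h, ih]; simp [pvG, h]

theorem pvInnerA_keys (am sm : List (Int × List Int)) (u : Int) (vs : List Int)
    (m : Int) (d : PySem.Dict Int Int)
    (hu : u ∈ d.keys) (hvs : ∀ v ∈ vs, v ∈ d.keys) :
    (pvInnerA am sm u vs (m, d)).2.keys = d.keys := by
  induction vs generalizing m d with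
  | nil => simp [pvInnerA]
  | cons v vs ih =>
    have hv : v ∈ d.keys := hvs v (by simp)
    simp only [pvInnerA] at ih ⊢
    rw [List.foldl_cons]
    by_cases h : pvDiffer am sm u v
    · rw [if_pos h]
      have hk1 : (d.modify u 0 (· + 1)).keys = d.keys := by
        rw [PySem.Dict.keys_modify,
          PySem.Dict.keys_insert_of_contains _ _ ((PySem.Dict.contains_iff_mem_keys d u).2 hu)]
      have hk2 : ((d.modify u 0 (· + 1)).modify v 0 (· + 1)).keys = d.keys := by
        rw [PySem.Dict.keys_modify,
          PySem.Dict.keys_insert_of_contains _ _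
            ((PySem.Dict.contains_iff_mem_keys _ v).2 (hk1 ▸ hv)), hk1]
      rw [ih _ _ (hk2 ▸ hu) (fun w hw => hk2 ▸ hvs w (by simp [hw])), hk2]
    · rw [if_neg h]
      exact ih _ _ hu (fun w hw => hvs w (by simp [hw]))

theorem pvInnerA_getD (am sm : List (Int × List Int)) (u : Int) (vs : List Int)
    (m : Int) (d : PySem.Dict Int Int) (x : Int) :
    (pvInnerA am sm u vs (m, d)).2.getD x 0 =
      d.getD x 0 + (if x = u then pvG am sm u vs else 0) +
        ((vs.filter (pvDiffer am sm u)).count x : Int) := by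
  induction vs generalizing m d with
  | nil => simp [pvInnerA, pvG]
  | cons v vs ih =>
    simp only [pvInnerA] at ih ⊢
    rw [List.foldl_cons]
    by_cases h : pvDiffer am sm u v
    · rw [if_pos h, ih]
      simp only [PySem.Dict.getD_modify, pvG, List.countP_cons, h, List.count_cons,
        List.filter_cons, if_true]
      by_cases hxu : x = u <;> by_cases hxv : x = v <;>
        simp [hxu, hxv, beq_iff_eq] <;> push_cast <;> omega
    · rw [if_neg h, ih]
      simp [pvG, h]

-- ---- A's outer loop ----
-- total increment A's loop adds to contributions[x]
def pvSA (am sm : List (Int × List Int)) : List Int → Int → Int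
  | [], _ => 0
  | u :: r, x => (if x = u then pvG am sm u r else 0) +
      ((r.filter (pvDiffer am sm u)).count x : Int) + pvSA am sm r x

theorem pvOuterA_fst (am sm : List (Int × List Int)) (nodes : List Int)
    (m : Int) (d : PySem.Dict Int Int) :
    (pvOuterA am sm nodes (m, d)).1 = m + pvPair am sm nodes := by
  induction nodes generalizing m d with
  | nil => simp [pvOuterA, pvPair]
  | cons u r ih =>
    simp only [pvOuterA]
    rcases hin : pvInnerA am sm u r (m, d) with ⟨m', d'⟩
    have h1 := pvInnerA_fst am sm u r m d
    rw [hin] at h1; simp at h1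
    rw [ih, h1, pvPair]; ring

theorem pvOuterA_keys (am sm : List (Int × List Int)) (nodes : List Int)
    (m : Int) (d : PySem.Dict Int Int) (hn : ∀ y ∈ nodes, y ∈ d.keys) :
    (pvOuterA am sm nodes (m, d)).2.keys = d.keys := by
  induction nodes generalizing m d with
  | nil => simp [pvOuterA]
  | cons u r ih =>
    simp only [pvOuterA]
    rcases hin : pvInnerA am sm u r (m, d) with ⟨m', d'⟩
    have h1 := pvInnerA_keys am sm u r m d (hn u (by simp)) (fun w hw => hn w (by simp [hw]))
    rw [hin] at h1; simp at h1
    rw [ih _ _ (fun y hy => h1 ▸ hn y (by simp [hy])), h1]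

theorem pvOuterA_getD (am sm : List (Int × List Int)) (nodes : List Int)
    (m : Int) (d : PySem.Dict Int Int) (x : Int) :
    (pvOuterA am sm nodes (m, d)).2.getD x 0 = d.getD x 0 + pvSA am sm nodes x := by
  induction nodes generalizing m d with
  | nil => simp [pvOuterA, pvSA]
  | cons u r ih =>
    simp only [pvOuterA]
    rcases hin : pvInnerA am sm u r (m, d) with ⟨m', d'⟩
    have h1 := pvInnerA_getD am sm u r m d x
    rw [hin] at h1; simp at h1
    rw [ih, h1, pvSA]; ring

-- count of x among the filtered partners factors through pvDiffer at x
theorem count_filter_differ (am sm : List (Int × List Int)) (u x : Int) (r : List Int) :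
    ((r.filter (pvDiffer am sm u)).count x : Int) =
      if pvDiffer am sm u x then (r.count x : Int) else 0 := by
  by_cases h : pvDiffer am sm u x
  · rw [List.count_filter h]; simp [h]
  · have hz : List.count x (r.filter (pvDiffer am sm u)) = 0 := by
      rw [List.count_eq_zero]; intro hx; exact h (List.of_mem_filter hx)
    simp [h, hz]

-- pvSA is the closed form B computes per node
theorem pvSA_eq (am sm : List (Int × List Int)) (nodes : List Int) (x : Int) :
    pvSA am sm nodes x = (nodes.count x : Int) * pvG am sm x nodes := by
  induction nodes with
  | nil => simp [pvSA, pvG]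
  | cons u r ih =>
    rw [pvSA, ih, count_filter_differ]
    simp only [pvG, List.count_cons, List.countP_cons]
    rw [pvDiffer_comm am sm u x]
    by_cases hxu : x = u
    · subst hxu
      simp [pvDiffer_self]
      ring
    · have hux : (u == x) = false := by simp [beq_iff_eq]; exact Ne.symm hxu
      by_cases hd : pvDiffer am sm x u
      · rw [if_neg hxu]
        simp [hd, hux]
        ring
      · rw [if_neg hxu]
        simp [hd, hux]

-- ---- handshake: sum of per-node counts is twice the pair count ----
theorem sum_g_eq_two_pair (am sm : List (Int × List Int)) (nodes : List Int) :
    (nodes.map (fun u => pvG am sm u nodes)).sum = 2 * pvPair am sm nodes := by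
  induction nodes with
  | nil => simp [pvPair]
  | cons u r ih =>
    simp only [List.map_cons, List.sum_cons, pvPair]
    have h1 : pvG am sm u (u :: r) = pvG am sm u r := by
      simp [pvG, pvDiffer_self]
    have h2 : (r.map (fun v => pvG am sm v (u :: r))).sum =
        pvG am sm u r + (r.map (fun v => pvG am sm v r)).sum := by
      have he : ∀ v, pvG am sm v (u :: r) =
          (if pvDiffer am sm v u then (1 : Int) else 0) + pvG am sm v r := by
        intro v; simp [pvG, List.countP_cons]
        by_cases h : pvDiffer am sm v u <;> simp [h] <;> push_cast <;> ring
      calc (r.map (fun v => pvG am sm v (u :: r))).sum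
          = (r.map (fun v => (if pvDiffer am sm v u then (1:Int) else 0) + pvG am sm v r)).sum := by
            simp only [he]
        _ = (r.map (fun v => if pvDiffer am sm v u then (1:Int) else 0)).sum
              + (r.map (fun v => pvG am sm v r)).sum := PySem.List.sum_map_add_int _ _ _
        _ = pvG am sm u r + (r.map (fun v => pvG am sm v r)).sum := by
            rw [PySem.List.sum_map_ite_one_zero]
            congr 1
            simp only [pvG]
            congr 1
            exact List.countP_congr (fun v _ => by rw [pvDiffer_comm])
    rw [h1, h2, ih]; ring

-- ---- B's pieces ----

-- counter loop keyed through a projection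
theorem getD_foldl_insert_key {β κ : Type} [BEq κ] [LawfulBEq κ]
    (l : List β) (key : β → κ) (d : PySem.Dict κ Int) (v : κ) :
    (l.foldl (fun d x => d.insert (key x) (d.getD (key x) 0 + 1)) d).getD v 0 =
      d.getD v 0 + ((l.map key).count v : Int) := by
  have h := PySem.Dict.getD_foldl_insert_add_one (l.map key) d v
  rw [List.foldl_map] at h
  exact h

-- the single B loop filling the three counters is the triple of the three counter folds
theorem cnts_split (keys : List ((Option (List Int)) × Option (List Int)))
    (a b : PySem.Dict (Option (List Int)) Int)
    (cd : PySem.Dict ((Option (List Int)) × Option (List Int)) Int) :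
    keys.foldl (fun t k =>
        (t.1.insert k.1 (t.1.getD k.1 0 + 1),
         (t.2.1.insert k.2 (t.2.1.getD k.2 0 + 1),
          t.2.2.insert k (t.2.2.getD k 0 + 1)))) (a, (b, cd))
      = (keys.foldl (fun d k => d.insert k.1 (d.getD k.1 0 + 1)) a,
         (keys.foldl (fun d k => d.insert k.2 (d.getD k.2 0 + 1)) b,
          keys.foldl (fun d k => d.insert k (d.getD k 0 + 1)) cd)) := by
  induction keys generalizing a b cd with
  | nil => rfl
  | cons k r ih => simp only [List.foldl_cons]; exact ih _ _ _

-- B's second loop, for an arbitrary per-node amount c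
theorem bLoop_snd (c : Int → Int) (l : List Int) (d : PySem.Dict Int Int) (t : Int) :
    (l.foldl (fun acc u => (acc.1.modify u 0 (· + c u), acc.2 + c u)) (d, t)).2 =
      t + (l.map c).sum := by
  induction l generalizing d t with
  | nil => simp
  | cons u r ih => simp only [List.foldl_cons, List.map_cons, List.sum_cons]; rw [ih]; ring

theorem bLoop_keys (c : Int → Int) (l : List Int) (d : PySem.Dict Int Int) (t : Int)
    (hn : ∀ y ∈ l, y ∈ d.keys) :
    (l.foldl (fun acc u => (acc.1.modify u 0 (· + c u), acc.2 + c u)) (d, t)).1.keys = d.keys := by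
  induction l generalizing d t with
  | nil => simp
  | cons u r ih =>
    simp only [List.foldl_cons]
    have hk : (d.modify u 0 (· + c u)).keys = d.keys := by
      rw [PySem.Dict.keys_modify,
        PySem.Dict.keys_insert_of_contains _ _
          ((PySem.Dict.contains_iff_mem_keys d u).2 (hn u (by simp)))]
    rw [ih _ _ (fun y hy => hk ▸ hn y (by simp [hy])), hk]

theorem bLoop_getD (c : Int → Int) (l : List Int) (d : PySem.Dict Int Int) (t : Int) (x : Int) :
    (l.foldl (fun acc u => (acc.1.modify u 0 (· + c u), acc.2 + c u)) (d, t)).1.getD x 0 =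
      d.getD x 0 + (l.count x : Int) * c x := by
  induction l generalizing d t with
  | nil => simp
  | cons u r ih =>
    simp only [List.foldl_cons, List.count_cons]
    rw [ih]
    rw [PySem.Dict.getD_modify]
    by_cases hxu : x = u
    · subst hxu; simp; push_cast; ring
    · have : (u == x) = false := by simp [beq_iff_eq]; exact Ne.symm hxu
      simp [hxu, this]

-- the init dict {node: 0} maps everything to 0 (under default 0)
theorem init_getD (nodes : List Int) (d : PySem.Dict Int Int) (h : ∀ k, d.getD k 0 = 0) (x : Int) :
    (nodes.foldl (fun d x => d.insert x 0) d).getD x 0 = 0 := by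
  induction nodes generalizing d with
  | nil => simp [h]
  | cons u r ih =>
    simp only [List.foldl_cons]
    exact ih _ (fun k => by rw [PySem.Dict.getD_insert]; split <;> simp [h])

theorem init_keys (nodes : List Int) :
    (nodes.foldl (fun d x => d.insert x (0:Int)) PySem.Dict.empty).keys =
      PySem.Set.ofList nodes := by
  rw [PySem.Dict.keys_foldl_insert]
  simp [PySem.Dict.keys_empty, PySem.Set.update_nil_left]

-- B's per-node amount equals pvG
theorem c_eq (am sm : List (Int × List Int)) (nodes : List Int) (x : Int) :
    ((nodes.map (pvGet am)).count (pvGet am x) : Int)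
      + ((nodes.map (pvGet sm)).count (pvGet sm x) : Int)
      - 2 * ((nodes.map (fun u => (pvGet am u, pvGet sm u))).count (pvGet am x, pvGet sm x) : Int)
      = pvG am sm x nodes := by
  induction nodes with
  | nil => simp [pvG]
  | cons v r ih =>
    simp only [pvG] at ih ⊢
    simp only [List.map_cons, List.count_cons, List.countP_cons]
    by_cases ha : pvGet am v = pvGet am x <;> by_cases hs : pvGet sm v = pvGet sm x
    · have b4 : pvDiffer am sm x v = false := by simp [pvDiffer, ha.symm, hs.symm]
      simp [ha, hs, b4]
      push_cast
      omega
    · have b4 : pvDiffer am sm x v = true := by simp [pvDiffer, ha.symm, Ne.symm hs]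
      have b2 : (pvGet sm v == pvGet sm x) = false := by simp [hs]
      have b3 : (((pvGet am v, pvGet sm v)) == ((pvGet am x, pvGet sm x))) = false := by
        simp [hs]
      simp [ha, hs, b2, b3, b4]
      push_cast
      omega
    · have b4 : pvDiffer am sm x v = true := by simp [pvDiffer, hs.symm, Ne.symm ha]
      have b1 : (pvGet am v == pvGet am x) = false := by simp [ha]
      have b3 : (((pvGet am v, pvGet sm v)) == ((pvGet am x, pvGet sm x))) = false := by
        simp [ha]
      simp [ha, hs, b1, b3, b4]
      push_cast
      omega
    · have b4 : pvDiffer am sm x v = false := by simp [pvDiffer, Ne.symm ha, Ne.symm hs]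
      have b1 : (pvGet am v == pvGet am x) = false := by simp [ha]
      have b2 : (pvGet sm v == pvGet sm x) = false := by simp [hs]
      have b3 : (((pvGet am v, pvGet sm v)) == ((pvGet am x, pvGet sm x))) = false := by
        simp [ha]
      simp [b1, b2, b3, b4]
      push_cast
      omega

-- the shared canonical value both ports compute
def pvCanon (am sm : List (Int × List Int)) (nodes : List Int) : Int × List (Int × Int) :=
  (pvPair am sm nodes,
   (PySem.Set.ofList nodes).map (fun k => (k, (nodes.count k : Int) * pvG am sm k nodes)))

theorem a_eq_canon (support : List Int) (am sm : List (Int × List Int)) :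
    pairwise_partition_mismatch support am sm = pvCanon am sm support := by
  unfold pairwise_partition_mismatch pvCanon
  simp only []
  rcases hr : pvOuterA am sm support
      (0, support.foldl (fun d x => d.insert x 0) PySem.Dict.empty) with ⟨m, dA⟩
  have hmem : ∀ y ∈ support, y ∈ (support.foldl (fun d x => d.insert x (0:Int)) PySem.Dict.empty).keys := by
    intro y hy; rw [init_keys]; exact (PySem.Set.mem_ofList _ _).2 hy
  have hfst := pvOuterA_fst am sm support 0 (support.foldl (fun d x => d.insert x 0) PySem.Dict.empty)
  have hkeys := pvOuterA_keys am sm support 0 _ hmem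
  have hgetD := pvOuterA_getD am sm support 0 (support.foldl (fun d x => d.insert x 0) PySem.Dict.empty)
  rw [hr] at hfst hkeys hgetD
  simp only [] at hfst hkeys hgetD
  refine Prod.ext_iff.2 ⟨?_, ?_⟩
  · rw [hfst]; ring
  · have hnd : dA.keys.Nodup := by rw [hkeys, init_keys]; exact PySem.Set.nodup_ofList _
    rw [PySem.Dict.items_eq_map_keys dA hnd 0, hkeys, init_keys]
    apply List.map_congr_left
    intro k _
    rw [hgetD k, init_getD _ _ (fun k => by simp [PySem.Dict.getD_empty]), pvSA_eq]
    ring_nf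

theorem b_eq_canon (support : List Int) (am sm : List (Int × List Int)) :
    pairwise_partition_mismatch_alt support am sm = pvCanon am sm support := by
  unfold pairwise_partition_mismatch_alt pvCanon
  simp only []
  rw [cnts_split, ← List.map_prod_left_eq_zip]
  simp only [List.foldl_map]
  have hcval : ∀ u : Int,
      ((support.foldl (fun d y => d.insert (pvGet am y) (d.getD (pvGet am y) 0 + 1)) PySem.Dict.empty).getD (pvGet am u) 0
        + (support.foldl (fun d y => d.insert (pvGet sm y) (d.getD (pvGet sm y) 0 + 1)) PySem.Dict.empty).getD (pvGet sm u) 0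
        - 2 * (support.foldl (fun d y => d.insert (pvGet am y, pvGet sm y) (d.getD (pvGet am y, pvGet sm y) 0 + 1)) PySem.Dict.empty).getD (pvGet am u, pvGet sm u) 0)
      = pvG am sm u support := by
    intro u
    rw [getD_foldl_insert_key support (fun y => pvGet am y),
        getD_foldl_insert_key support (fun y => pvGet sm y),
        getD_foldl_insert_key support (fun y => (pvGet am y, pvGet sm y))]
    simpa [PySem.Dict.getD_empty] using c_eq am sm support u
  simp only [hcval]
  refine Prod.ext_iff.2 ⟨?_, ?_⟩
  · rw [bLoop_snd (fun u => pvG am sm u support) support _ 0,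
      sum_g_eq_two_pair am sm support]
    simp [PySem.Int.floordiv_eq_ediv_of_pos (by norm_num : (0:Int) < 2)]
  · have hmem : ∀ y ∈ support, y ∈ (support.foldl (fun d x => d.insert x (0:Int)) PySem.Dict.empty).keys := by
      intro y hy; rw [init_keys]; exact (PySem.Set.mem_ofList _ _).2 hy
    have hkeys := bLoop_keys (fun u => pvG am sm u support) support _ 0 hmem
    have hnd : (support.foldl (fun acc u =>
        (acc.1.modify u 0 (· + pvG am sm u support), acc.2 + pvG am sm u support))
        ((support.foldl (fun d x => d.insert x (0:Int)) PySem.Dict.empty), 0)).1.keys.Nodup := by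
      rw [hkeys, init_keys]; exact PySem.Set.nodup_ofList _
    rw [PySem.Dict.items_eq_map_keys _ hnd 0, hkeys, init_keys]
    apply List.map_congr_left
    intro k _
    rw [bLoop_getD, init_getD _ _ (fun k => by simp [PySem.Dict.getD_empty])]
    ring_nf

-- ===== VERDICT (by name: the statement is the Claim_ definition above) =====
theorem pairwise_partition_mismatch_spec : Claim_equal_pairwise_partition_mismatch := by
  intro support am sm _
  unfold Spec_pairwise_partition_mismatch
  rw [a_eq_canon, b_eq_canon]
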